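-- pv_equiv track=rewrite | github.com/ElchaabiMohamed/InferCode_SVM | Du-42487-python-files/program_25078.py | weird_case
-- ===== SOURCE A (Python) =====
-- def weird_case(some_str):
-- 	ret = ""
-- 	i = True
-- 	for char in some_str:
-- 		if i:
-- 			ret += char.upper()
-- 		else:
-- 			ret += char.lower()
-- 		if char != ' ':
-- 			i = not i
-- 	return ret
-- ===== SOURCE B (Python) =====
-- def weird_case(some_str):
--     # Two passes: build a prefix table of non-space counts, then map cases from it.
--     counts = []
--     c = 0
--     for ch in some_str:
--         counts.append(c)
--         if ch != ' ':
--             c += 1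
--     return ''.join(ch.upper() if k % 2 == 0 else ch.lower()
--                    for ch, k in zip(some_str, counts))
-- ===== Notes on version B (the rewrite author's own statement) =====
-- stated objective: alternative
-- what changed: Replaces the interleaved boolean-toggle loop by two separate passes: a prefix table counting non-space characters before each position, then a zip/map pass choosing upper/lower by count parity.
import Mathlib
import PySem

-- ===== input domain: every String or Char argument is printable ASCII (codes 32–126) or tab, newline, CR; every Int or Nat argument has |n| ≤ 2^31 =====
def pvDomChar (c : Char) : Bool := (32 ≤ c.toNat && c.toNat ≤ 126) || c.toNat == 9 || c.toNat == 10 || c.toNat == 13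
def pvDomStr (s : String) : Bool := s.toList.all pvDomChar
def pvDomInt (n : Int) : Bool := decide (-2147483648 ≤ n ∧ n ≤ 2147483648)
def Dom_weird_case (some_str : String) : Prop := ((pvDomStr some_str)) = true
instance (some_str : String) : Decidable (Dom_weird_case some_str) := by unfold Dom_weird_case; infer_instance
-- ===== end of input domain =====

-- B separates the alternation position (a prefix count of non-space chars) from the case
-- assignment, two passes instead of one toggle loop; objective: alternative decomposition.


-- ===== PORT A =====
-- single pass: accumulate the string and a toggle flag i (flipped on non-space chars)
def weird_case (some_str : String) : String :=
  (some_str.toList.foldl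
    (fun (st : List Char × Bool) ch =>
      let ret := if st.2 then st.1 ++ [PySem.Chars.upperChar ch] else st.1 ++ [PySem.Chars.lowerChar ch]
      let i := if ch ≠ ' ' then !st.2 else st.2
      (ret, i))
    ([], true)).1.asString

-- ===== PORT B =====
-- pass 1: prefix table of non-space counts; pass 2: zip + map by parity
def weird_case_alt (some_str : String) : String :=
  let counts := (some_str.toList.foldl
    (fun (st : List Nat × Nat) ch =>
      (st.1 ++ [st.2], if ch ≠ ' ' then st.2 + 1 else st.2))
    ([], 0)).1
  (((some_str.toList.zip counts).map
      (fun p => if p.2 % 2 = 0 then PySem.Chars.upperChar p.1 else PySem.Chars.lowerChar p.1)).asString)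

-- ===== PRECONDITION & SPEC =====
def Spec_weird_case (some_str : String) (out : String) : Prop := out = weird_case_alt some_str
instance (some_str : String) (out : String) : Decidable (Spec_weird_case some_str out) := by unfold Spec_weird_case; infer_instance

-- ===== CLAIM (what is proved, stated in full; the proofs are below) =====
def Claim_equal_weird_case : Prop := ∀ (some_str : String), Dom_weird_case some_str → Spec_weird_case some_str (weird_case some_str)

-- ===== LEMMAS AND PROOFS =====

-- the common spine: output characters as a function of the running non-space count
def pvOutAux : List Char → Nat → List Char
  | [], _ => []
  | ch :: t, c =>
      (if c % 2 = 0 then PySem.Chars.upperChar ch else PySem.Chars.lowerChar ch)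
        :: pvOutAux t (if ch ≠ ' ' then c + 1 else c)

-- the prefix-count spine
def pvCountsAux : List Char → Nat → List Nat
  | [], _ => []
  | ch :: t, c => c :: pvCountsAux t (if ch ≠ ' ' then c + 1 else c)

theorem pvFoldA_eq (l : List Char) : ∀ (acc : List Char) (c : Nat),
    (l.foldl
      (fun (st : List Char × Bool) ch =>
        let ret := if st.2 then st.1 ++ [PySem.Chars.upperChar ch] else st.1 ++ [PySem.Chars.lowerChar ch]
        let i := if ch ≠ ' ' then !st.2 else st.2
        (ret, i))
      (acc, decide (c % 2 = 0))).1 = acc ++ pvOutAux l c := by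
  induction l with
  | nil => intro acc c; simp [pvOutAux]
  | cons ch t ih =>
    intro acc c
    rw [List.foldl_cons]
    have hflag : (if ch ≠ ' ' then !decide (c % 2 = 0) else decide (c % 2 = 0))
        = decide ((if ch ≠ ' ' then c + 1 else c) % 2 = 0) := by
      by_cases hsp : ch = ' ' <;> by_cases hc : c % 2 = 0 <;>
        simp [hsp, hc] <;> omega
    dsimp only
    rw [hflag, ih]
    conv_rhs => rw [pvOutAux]
    by_cases hc : c % 2 = 0 <;> simp [hc]

theorem pvFoldB_eq (l : List Char) : ∀ (cs : List Nat) (c : Nat),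
    (l.foldl
      (fun (st : List Nat × Nat) ch =>
        (st.1 ++ [st.2], if ch ≠ ' ' then st.2 + 1 else st.2))
      (cs, c)).1 = cs ++ pvCountsAux l c := by
  induction l with
  | nil => intro cs c; simp [pvCountsAux]
  | cons ch t ih =>
    intro cs c
    rw [List.foldl_cons, ih, pvCountsAux]
    simp

theorem pvZip_eq (l : List Char) : ∀ (c : Nat),
    (l.zip (pvCountsAux l c)).map
      (fun p => if p.2 % 2 = 0 then PySem.Chars.upperChar p.1 else PySem.Chars.lowerChar p.1)
      = pvOutAux l c := by
  induction l with
  | nil => intro c; simp [pvCountsAux, pvOutAux]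
  | cons ch t ih =>
    intro c
    rw [pvCountsAux, pvOutAux, List.zip_cons_cons, List.map_cons, ih]

-- ===== VERDICT (by name: the statement is the Claim_ definition above) =====
theorem weird_case_spec : Claim_equal_weird_case := by
  intro s _
  unfold Spec_weird_case weird_case weird_case_alt
  have hA := pvFoldA_eq s.toList [] 0
  have hB := pvFoldB_eq s.toList [] 0
  rw [show (decide ((0:Nat) % 2 = 0)) = true from rfl] at hA
  rw [List.nil_append] at hA hB
  dsimp only
  rw [hA, hB, pvZip_eq]
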